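-- pv_equiv track=rewrite | github.com/chandu1234678/fake-news-analyzer | backend/app/analysis/shap_explainer.py | _generate_background_data
-- ===== SOURCE A (Python) =====
-- from typing import Dict, List, Optional, Tuple
--
-- def _generate_background_data(n_samples: int = 50) -> List[str]:
--     """Generate representative background data for KernelExplainer"""
--     # Use common phrases from fake and real news
--     background = [
--         "This is a news article about current events.",
--         "Scientists have discovered new findings in research.",
--         "The government announced a new policy today.",
--         "Breaking news: major development in ongoing story.",
--         "Experts say this could have significant impact.",
--         "According to sources, the situation is developing.",
--         "Reports indicate that changes are coming soon.",
--         "Officials confirmed the information yesterday.",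
--         "Studies show evidence of important trends.",
--         "The president made a statement about the issue.",
--     ]
--
--     # Repeat to reach n_samples
--     while len(background) < n_samples:
--         background.extend(background[:min(10, n_samples - len(background))])
--
--     return background[:n_samples]
-- ===== SOURCE B (Python) =====
-- def _generate_background_data(n_samples: int = 50):
--     """Generate representative background data for KernelExplainer"""
--     background = [
--         "This is a news article about current events.",
--         "Scientists have discovered new findings in research.",
--         "The government announced a new policy today.",
--         "Breaking news: major development in ongoing story.",
--         "Experts say this could have significant impact.",
--         "According to sources, the situation is developing.",
--         "Reports indicate that changes are coming soon.",
--         "Officials confirmed the information yesterday.",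
--         "Studies show evidence of important trends.",
--         "The president made a statement about the issue.",
--     ]
--     if n_samples <= len(background):
--         return background[:n_samples]
--     # build the result element by element, cycling through the templates by index
--     return [background[i % len(background)] for i in range(n_samples)]
-- ===== Notes on version B (the rewrite author's own statement) =====
-- stated objective: simpler
-- what changed: Replaces the extend-and-truncate while loop over a growing list by direct element-wise construction: a single comprehension that picks background[i % 10] for each output position (with a plain slice when n_samples fits in the base list).
import Mathlib
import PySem

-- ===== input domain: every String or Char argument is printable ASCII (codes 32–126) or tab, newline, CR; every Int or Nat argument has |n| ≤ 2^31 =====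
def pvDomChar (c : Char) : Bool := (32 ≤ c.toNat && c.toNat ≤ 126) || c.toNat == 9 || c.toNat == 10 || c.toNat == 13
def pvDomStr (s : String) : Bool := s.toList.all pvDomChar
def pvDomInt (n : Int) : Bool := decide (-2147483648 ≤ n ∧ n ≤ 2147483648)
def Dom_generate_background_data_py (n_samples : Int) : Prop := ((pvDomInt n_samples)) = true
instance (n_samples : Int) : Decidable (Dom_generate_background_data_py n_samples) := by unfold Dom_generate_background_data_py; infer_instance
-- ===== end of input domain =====

-- B replaces A's extend-and-truncate while loop by direct element-wise construction:
-- each output position i gets background[i % 10] (a plain slice when n fits) (objective: simpler).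

-- ===== PORT A =====
-- the 10 fixed background templates
def pvBase : List String :=
  [ "This is a news article about current events.",
    "Scientists have discovered new findings in research.",
    "The government announced a new policy today.",
    "Breaking news: major development in ongoing story.",
    "Experts say this could have significant impact.",
    "According to sources, the situation is developing.",
    "Reports indicate that changes are coming soon.",
    "Officials confirmed the information yesterday.",
    "Studies show evidence of important trends.",
    "The president made a statement about the issue." ]

-- the while loop, fuel-bounded (fuel only makes the recursion total: starting from the
-- 10-element list every iteration grows the list by at least one, so n.toNat steps always suffice;
-- inside the loop the slice bound min 10 (n - len) is ≥ 1, so `.take k.toNat` is exactly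
-- Python's background[:k]).
def pvLoopA : Nat → Int → List String → List String
  | 0, _, bg => bg
  | fuel + 1, n, bg =>
      if (bg.length : Int) < n then
        pvLoopA fuel n (bg ++ bg.take (min 10 (n - (bg.length : Int))).toNat)
      else bg

def generate_background_data_py (n_samples : Int) : List String :=
  PySem.List.slice (pvLoopA n_samples.toNat n_samples pvBase) none (some n_samples)

-- ===== PORT B =====
-- Source B: slice when n_samples ≤ len(background); otherwise the comprehension
-- [background[i % len(background)] for i in range(n_samples)].  The index i % 10 is
-- always in range (0 ≤ i < n), so the .getD "" default only totalises the lookup.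
def generate_background_data_py_alt (n_samples : Int) : List String :=
  if n_samples ≤ (pvBase.length : Int) then
    PySem.List.slice pvBase none (some n_samples)
  else
    (PySem.List.pyRange 0 n_samples 1).map
      (fun i => PySem.List.pyGetD pvBase (PySem.Int.mod i (pvBase.length : Int)) "")

-- ===== PRECONDITION & SPEC =====
def Spec_generate_background_data_py (n_samples : Int) (out : List String) : Prop := out = generate_background_data_py_alt n_samples
instance (n_samples : Int) (out : List String) : Decidable (Spec_generate_background_data_py n_samples out) := by unfold Spec_generate_background_data_py; infer_instance

-- ===== CLAIM (what is proved, stated in full; the proofs are below) =====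
def Claim_equal_generate_background_data_py : Prop := ∀ (n_samples : Int), Dom_generate_background_data_py n_samples → Spec_generate_background_data_py n_samples (generate_background_data_py n_samples)

-- ===== LEMMAS AND PROOFS =====

-- R j = j copies of the base list
def pvR (j : Nat) : List String := List.flatten (List.replicate j pvBase)

theorem pvBase_length : pvBase.length = 10 := by decide

theorem pvR_length (j : Nat) : (pvR j).length = 10 * j := by
  induction j with
  | zero => simp [pvR]
  | succ j ih =>
      simp [pvR, List.replicate_succ, List.flatten_cons] at *
      simpa [pvBase_length, Nat.mul_succ, Nat.succ_mul] using by omega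

theorem pvR_succ (j : Nat) : pvR (j + 1) = pvR j ++ pvBase := by
  simp [pvR, List.replicate_add, List.flatten_append]

theorem pvR_succ' (j : Nat) : pvR (j + 1) = pvBase ++ pvR j := by
  simp [pvR, List.replicate_succ, List.flatten_cons]

-- prefixes of any positive number of base copies are prefixes of the base
theorem pvR_take_base (j k : Nat) (hj : 1 ≤ j) (hk : k ≤ 10) :
    (pvR j).take k = pvBase.take k := by
  obtain ⟨j', rfl⟩ : ∃ j', j = j' + 1 := ⟨j - 1, by omega⟩
  rw [pvR_succ', List.take_append_of_le_length (by simp [pvBase_length, hk])]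

-- cyclic indexing: position t of j base copies is template t % 10
theorem pvR_getElem? (j t : Nat) (ht : t < 10 * j) :
    (pvR j)[t]? = pvBase[t % 10]? := by
  induction j generalizing t with
  | zero => omega
  | succ j ih =>
      rw [pvR_succ']
      by_cases h10 : t < 10
      · rw [List.getElem?_append_left (by rw [pvBase_length]; exact h10),
          Nat.mod_eq_of_lt h10]
      · have hge : pvBase.length ≤ t := by rw [pvBase_length]; omega
        rw [List.getElem?_append_right hge, pvBase_length, ih (t - 10) (by omega)]
        congr 1
        omega

theorem pvLoopA_noop (fuel : Nat) (n : Int) (bg : List String)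
    (h : ¬ ((bg.length : Int) < n)) : pvLoopA fuel n bg = bg := by
  cases fuel with
  | zero => rfl
  | succ fuel => simp [pvLoopA, h]

-- replications agree on any prefix both cover
theorem pvR_take_agree (a b t : Nat) (ha : t ≤ 10 * a) (hb : t ≤ 10 * b) :
    (pvR a).take t = (pvR b).take t := by
  have step : ∀ c, t ≤ 10 * c → (pvR c).take t = (pvR (c + 1)).take t := by
    intro c hc
    rw [pvR_succ, List.take_append_of_le_length (by rw [pvR_length]; exact hc)]
  have gen : ∀ c d, t ≤ 10 * c → (pvR c).take t = (pvR (c + d)).take t := by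
    intro c d hc
    induction d with
    | zero => rfl
    | succ d ih => rw [ih, ← Nat.add_assoc, step (c + d) (by omega)]
  rcases Nat.le_total a b with h | h
  · obtain ⟨d, rfl⟩ := Nat.le.dest h; exact gen a d ha
  · obtain ⟨d, rfl⟩ := Nat.le.dest h; exact (gen b d hb).symm

-- the while loop run from j full copies, with enough fuel
theorem pvLoopA_run (fuel : Nat) (n : Int) (j : Nat) (hj : 1 ≤ j)
    (hfuel : n ≤ 10 * (j + fuel)) :
    pvLoopA fuel n (pvR j) =
      if n ≤ 10 * j then pvR j else (pvR (j + fuel)).take n.toNat := by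
  induction fuel generalizing j with
  | zero =>
      have : n ≤ 10 * j := by push_cast at hfuel ⊢; omega
      simp [pvLoopA, this]
  | succ fuel ih =>
      by_cases hlt : ((pvR j).length : Int) < n
      · have hlen : ((pvR j).length : Int) = 10 * j := by rw [pvR_length]; push_cast; ring
        have hnj : (10 * j : Int) < n := by rw [hlen] at hlt; exact_mod_cast hlt
        rw [pvLoopA]
        simp only [hlt, if_true]
        by_cases hbig : (10 : Int) ≤ n - (pvR j).length
        · have hmin : min 10 (n - ((pvR j).length : Int)) = 10 := by omega
          have htk : (pvR j).take (min 10 (n - ((pvR j).length : Int))).toNat = pvBase := by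
            rw [hmin, show ((10 : Int)).toNat = 10 from rfl,
              pvR_take_base j 10 hj (le_refl 10)]
            exact List.take_of_length_le (by rw [pvBase_length])
          rw [htk, ← pvR_succ]
          have h1 : n ≤ 10 * ((j + 1) + fuel) := by push_cast at hfuel ⊢; omega
          rw [ih (j + 1) (by omega) h1]
          have hjf : j + 1 + fuel = j + (fuel + 1) := by omega
          by_cases hend : n ≤ 10 * ((j : Int) + 1)
          · have hn : n = 10 * ((j : Int) + 1) := by rw [hlen] at hbig; omega
            have hnn : n.toNat = (pvR (j + 1)).length := by rw [pvR_length]; omega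
            have hag : (pvR (j + 1 + fuel)).take n.toNat = (pvR (j + 1)).take n.toNat :=
              (pvR_take_agree (j + 1) (j + 1 + fuel) n.toNat (by rw [pvR_length] at hnn; omega)
                (by rw [pvR_length] at hnn; omega)).symm
            rw [if_pos (by push_cast; omega), if_neg (by omega), hjf.symm, hag, hnn,
              List.take_length]
          · rw [if_neg (by push_cast at hend ⊢; omega), if_neg (by omega), hjf]
        · have hpos : (0 : Int) < n - ((pvR j).length : Int) := by omega
          have hmin : min 10 (n - ((pvR j).length : Int)) = n - ((pvR j).length : Int) := by omega
          have hk10 : (n - ((pvR j).length : Int)).toNat ≤ 10 := by omega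
          set k : Nat := (n - ((pvR j).length : Int)).toNat with hkdef
          have htk : (pvR j).take k = pvBase.take k := pvR_take_base j k hj hk10
          rw [hmin, ← hkdef, htk]
          have hlen2 : (pvR j ++ pvBase.take k).length = n.toNat := by
            rw [List.length_append, List.length_take, pvBase_length, pvR_length]
            omega
          rw [pvLoopA_noop fuel n _ (by rw [hlen2]; omega)]
          have heq : pvR j ++ pvBase.take k = (pvR (j + 1)).take n.toNat := by
            have hLk : (pvR j).length ≤ n.toNat := by omega
            have hkk : n.toNat - (pvR j).length = k := by omega
            rw [pvR_succ, List.take_append, List.take_of_length_le hLk, hkk]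
          have hb1 : n.toNat ≤ 10 * (j + 1) := by omega
          have hb2 : n.toNat ≤ 10 * (j + fuel + 1) := by push_cast at hfuel; omega
          rw [heq, pvR_take_agree (j + 1) (j + fuel + 1) n.toNat hb1 hb2]
          rw [if_neg (by omega), show j + fuel + 1 = j + (fuel + 1) by omega]
      · rw [pvLoopA]
        simp only [hlt, if_false]
        have : n ≤ 10 * (j : Int) := by
          rw [pvR_length] at hlt; push_cast at hlt; omega
        simp [this]

-- B's comprehension equals a truncated replication of the base list
theorem pvAlt_eq_take (n : Int) (hn : 10 < n) (j : Nat) (hcov : n.toNat ≤ 10 * j) :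
    (PySem.List.pyRange 0 n 1).map
        (fun i => PySem.List.pyGetD pvBase (PySem.Int.mod i (pvBase.length : Int)) "") =
      (pvR j).take n.toNat := by
  rw [PySem.List.pyRange_one]
  apply List.ext_getElem
  · simp [pvR_length]; omega
  · intro t h1 h2
    have ht : t < n.toNat := by simpa using h1
    simp only [List.getElem_map, List.getElem_range, List.getElem_take]
    have hmod : PySem.Int.mod ((0 : Int) + t) (pvBase.length : Int)
        = ((t % 10 : Nat) : Int) := by
      rw [pvBase_length, PySem.Int.mod_eq_emod_of_pos (by omega)]
      push_cast
      omega
    rw [hmod, PySem.List.pyGetD_natCast]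
    have hget := pvR_getElem? j t (by omega)
    have hlt10 : t % 10 < pvBase.length := by rw [pvBase_length]; omega
    have hltj : t < (pvR j).length := by rw [pvR_length]; omega
    rw [List.getElem?_eq_getElem hltj, List.getElem?_eq_getElem hlt10] at hget
    rw [List.getD_eq_getElem?_getD, List.getElem?_eq_getElem hlt10]
    simpa using hget.symm

-- ===== VERDICT (by name: the statement is the Claim_ definition above) =====
theorem generate_background_data_py_spec : Claim_equal_generate_background_data_py := by
  intro n _
  unfold Spec_generate_background_data_py generate_background_data_py generate_background_data_py_alt
  by_cases hn : n ≤ (pvBase.length : Int)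
  · -- loop never runs; both sides slice the bare base list
    rw [pvLoopA_noop _ _ _ (by omega), if_pos hn]
  · -- n > 10: A is take n.toNat of enough base copies, and so is B's comprehension
    rw [if_neg hn]
    rw [pvBase_length] at hn
    push_cast at hn
    have hfuel : n ≤ 10 * ((1 : Nat) + n.toNat) := by push_cast; omega
    have hA : pvLoopA n.toNat n pvBase = (pvR (1 + n.toNat)).take n.toNat := by
      have := pvLoopA_run n.toNat n 1 (le_refl 1) hfuel
      rw [show pvR 1 = pvBase by simp [pvR]] at this
      rw [this, if_neg (by push_cast; omega)]
    rw [hA, PySem.List.slice_to _ (by omega), List.take_take, Nat.min_self,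
      pvAlt_eq_take n (by omega) (1 + n.toNat) (by omega)]
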